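-- pv_equiv track=rewrite | github.com/matt-berk/data-structures | IIT-Projects/IIT_HOMEWORK_1.py | ascii_art
-- ===== SOURCE A (Python) =====
-- def ascii_art(x:str):
--     st = ""
--     st_reverse = ""
--     n = len(x)
--     for i in range(0,n):
--         temp1 = x[0:i+1]
--         temp2 = x[i:0:-1]
--         temp = ".".join(temp2 + temp1)
--         temp = temp.center(4*n-3, ".")
--         st += temp
--         if i != n-1:
--             st += "\n"
--     for i in range(n-2,-1,-1):
--         temp1 = x[0:i+1]
--         temp2 = x[i:0:-1]
--         temp = ".".join(temp2 + temp1)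
--         temp = temp.center(4*n-3, ".")
--         st_reverse += temp
--         if i != 0:
--             st_reverse += "\n"
--     return st + st_reverse
-- ===== SOURCE B (Python) =====
-- def ascii_art(x: str):
--     n = len(x)
--     w = 4 * n - 3
--     rows = []
--     if n:
--         cur = ["."] * w
--         cur[2 * n - 2] = x[0]
--         rows.append("".join(cur))
--         for i in range(1, n):
--             p = 2 * (n - 1 - i)
--             cur[p] = x[i]
--             cur[w - 1 - p] = x[i]
--             rows.append("".join(cur))
--     return "\n".join(rows) + "\n".join(rows[-2::-1])
-- ===== Notes on version B (the rewrite author's own statement) =====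
-- stated objective: alternative
-- what changed: B builds the diamond incrementally: it keeps one mutable row (all dots with the first letter at the centre column) and derives each next row by overwriting exactly two cells of the previous one with the next letter, storing snapshots; the lower half reuses the stored rows via a reversed slice, instead of A's per-row slice/reverse/join/center string construction repeated in two loops.
import Mathlib
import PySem

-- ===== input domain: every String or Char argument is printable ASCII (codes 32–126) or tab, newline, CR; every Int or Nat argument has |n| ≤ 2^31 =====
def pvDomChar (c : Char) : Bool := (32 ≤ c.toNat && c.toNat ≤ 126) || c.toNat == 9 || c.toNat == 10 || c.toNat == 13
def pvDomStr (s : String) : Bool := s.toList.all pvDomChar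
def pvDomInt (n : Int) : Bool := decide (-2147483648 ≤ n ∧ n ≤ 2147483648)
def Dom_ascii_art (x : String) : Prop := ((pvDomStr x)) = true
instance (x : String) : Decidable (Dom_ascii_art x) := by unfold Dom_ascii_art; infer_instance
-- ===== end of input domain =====

-- B builds the diamond incrementally: one mutable row, each step overwriting exactly two cells
-- of the previous row, the mirror half reusing the stored rows — instead of A's per-row
-- slice/reverse/join/center string construction (objective: alternative).

-- ===== PORT A =====
-- s.center(w, '.') — PySem has no center; hand port, exact to CPython's
-- left = marg // 2 + (marg & width & 1) padding rule for nonnegative widths (the only widths reached here).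
def pvCenter (cs : List Char) (w : Int) : List Char :=
  if w ≤ (cs.length : Int) then cs
  else
    let marg : Nat := (w - (cs.length : Int)).toNat
    let left : Nat := marg / 2 + (marg &&& w.toNat &&& 1)
    List.replicate left '.' ++ cs ++ List.replicate (marg - left) '.'

-- temp = ".".join(x[i:0:-1] + x[0:i+1]).center(4*n-3, ".") — A's per-row construction
def pvRow (cs : List Char) (n : Nat) (i : Int) : List Char :=
  let temp1 := PySem.List.slice cs (some 0) (some (i + 1))
  let temp2 := (PySem.List.slice? cs (some i) (some 0) (-1)).getD []
  pvCenter (PySem.Chars.join ['.'] ((temp2 ++ temp1).map (fun c => [c]))) (4 * (n : Int) - 3)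

def ascii_art (x : String) : String :=
  let cs := x.toList
  let n := cs.length
  let st := (PySem.List.pyRange 0 (n : Int) 1).foldl
    (fun st i => st ++ pvRow cs n i ++ (if i ≠ (n : Int) - 1 then ['\n'] else [])) []
  let st_reverse := (PySem.List.pyRange ((n : Int) - 2) (-1) (-1)).foldl
    (fun st i => st ++ pvRow cs n i ++ (if i ≠ 0 then ['\n'] else [])) []
  String.ofList (st ++ st_reverse)

-- ===== PORT B =====
-- loop body: p = 2*(n-1-i); cur[p] = x[i]; cur[w-1-p] = x[i]; rows.append("".join(cur))
-- (p and w-1-p are nonnegative whenever the loop runs, so .toNat is exact; x[i] is in range,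
-- so pyGet?'s getD '.' is never reached)
def pvStepB (cs : List Char) (n : Nat) (st : List (List Char) × List Char) (i : Int) :
    List (List Char) × List Char :=
  let p := 2 * ((n : Int) - 1 - i)
  let v := (PySem.List.pyGet? cs i).getD '.'
  let cur := (st.2.set p.toNat v).set ((4 * (n : Int) - 3 - 1 - p).toNat) v
  (st.1 ++ [cur], cur)

def ascii_art_alt (x : String) : String :=
  let cs := x.toList
  let n := cs.length
  let rows :=
    if n ≠ 0 then
      -- cur = ["."] * w; cur[2*n-2] = x[0]; rows = ["".join(cur)]
      let cur := (List.replicate ((4 * (n : Int) - 3).toNat) '.').set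
          ((2 * (n : Int) - 2).toNat) ((PySem.List.pyGet? cs 0).getD '.')
      ((PySem.List.pyRange 1 (n : Int) 1).foldl (pvStepB cs n) ([cur], cur)).1
    else []
  String.ofList (PySem.Chars.join ['\n'] rows ++
    PySem.Chars.join ['\n'] ((PySem.List.slice? rows (some (-2)) none (-1)).getD []))

-- ===== PRECONDITION & SPEC =====
def Spec_ascii_art (x : String) (out : String) : Prop := out = ascii_art_alt x
instance (x : String) (out : String) : Decidable (Spec_ascii_art x out) := by unfold Spec_ascii_art; infer_instance

-- ===== CLAIM (what is proved, stated in full; the proofs are below) =====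
def Claim_equal_ascii_art : Prop := ∀ (x : String), Dom_ascii_art x → Spec_ascii_art x (ascii_art x)

-- ===== LEMMAS AND PROOFS =====

-- closed-form cell rule used only in the proofs: the letter x[|c-m|/2] sits where the offset
-- from the centre column m is even and at most 2i, everything else is '.'.
def pvCell (cs : List Char) (i : Int) (m : Int) (c : Int) : Char :=
  let d := c - m
  if |d| ≤ 2 * i ∧ PySem.Int.mod d 2 = 0 then
    (PySem.List.pyGet? cs (PySem.Int.floordiv |d| 2)).getD '.'
  else '.'

-- row i of the grid, in closed form
def pvRowR (cs : List Char) (n : Nat) (i : Int) : List Char :=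
  (PySem.List.pyRange 0 (4 * (n : Int) - 3) 1).map (pvCell cs i (2 * (n : Int) - 2))


-- A loop that appends 'row ++ sep' except after the last element equals a join,
-- provided the last element does not occur earlier.
theorem pv_foldl_sep_join (sep : List Char) (f : Int → List Char) :
    ∀ (l : List Int) (a : Int) (acc : List Char), a ∉ l →
      (l ++ [a]).foldl (fun st i => st ++ f i ++ (if i ≠ a then sep else [])) acc
        = acc ++ PySem.Chars.join sep ((l ++ [a]).map f) := by
  intro l
  induction l with
  | nil =>
      intro a acc _
      simp [PySem.Chars.join_singleton]
  | cons b l ih =>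
      intro a acc h
      have hba : b ≠ a := fun hb => h (by simp [hb])
      have hal : a ∉ l := fun hm => h (by simp [hm])
      obtain ⟨y, ys, hy⟩ : ∃ y ys, (l ++ [a]).map f = y :: ys := by
        cases l <;> simp
      calc ((b :: l) ++ [a]).foldl (fun st i => st ++ f i ++ (if i ≠ a then sep else [])) acc
          = (l ++ [a]).foldl (fun st i => st ++ f i ++ (if i ≠ a then sep else []))
              (acc ++ f b ++ sep) := by simp [hba]
        _ = (acc ++ f b ++ sep) ++ PySem.Chars.join sep ((l ++ [a]).map f) := ih a _ hal
        _ = acc ++ PySem.Chars.join sep (((b :: l) ++ [a]).map f) := by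
              simp [hy, PySem.Chars.join_cons_cons, List.append_assoc]

-- A's whole output as two '\n'-joins of pvRow over the ascending and descending index lists.
theorem pv_A_form (x : String) :
    ascii_art x = String.ofList
      (PySem.Chars.join ['\n'] ((PySem.List.pyRange 0 (x.toList.length : Int) 1).map
          (pvRow x.toList x.toList.length)) ++
       PySem.Chars.join ['\n'] (((PySem.List.pyRange 0 ((x.toList.length : Int) - 1) 1).reverse).map
          (pvRow x.toList x.toList.length))) := by
  unfold ascii_art
  simp only []
  set cs := x.toList with hcs
  set n := cs.length with hn
  set f := pvRow cs n with hf
  rcases Nat.eq_zero_or_pos n with h0 | hpos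
  · have e1 : PySem.List.pyRange 0 (n : Int) 1 = [] :=
      PySem.List.pyRange_one_eq_nil (a := 0) (b := (n : Int)) (by omega)
    have e2 : PySem.List.pyRange ((n : Int) - 2) (-1) (-1) = [] :=
      PySem.List.pyRange_neg_one_eq_nil (a := (n : Int) - 2) (b := -1) (by omega)
    have e3 : PySem.List.pyRange 0 ((n : Int) - 1) 1 = [] :=
      PySem.List.pyRange_one_eq_nil (a := 0) (b := (n : Int) - 1) (by omega)
    simp [e1, e2, e3, PySem.Chars.join_nil]
  · have h1 : PySem.List.pyRange 0 (n : Int) 1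
        = PySem.List.pyRange 0 ((n : Int) - 1) 1 ++ [(n : Int) - 1] := by
      have h := PySem.List.pyRange_one_succ_right (a := 0) (b := (n : Int) - 1) (by omega)
      rw [show ((n : Int) - 1) + 1 = (n : Int) by ring] at h
      exact h
    have hnot1 : (n : Int) - 1 ∉ PySem.List.pyRange 0 ((n : Int) - 1) 1 := by
      simp [PySem.List.mem_pyRange_one]
    have hst : (PySem.List.pyRange 0 (n : Int) 1).foldl
        (fun st i => st ++ f i ++ (if i ≠ (n : Int) - 1 then ['\n'] else [])) []
        = PySem.Chars.join ['\n'] ((PySem.List.pyRange 0 (n : Int) 1).map f) := by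
      rw [h1, pv_foldl_sep_join ['\n'] f _ _ [] hnot1]
      simp
    have h2 : PySem.List.pyRange ((n : Int) - 2) (-1) (-1)
        = (PySem.List.pyRange 0 ((n : Int) - 1) 1).reverse := by
      have h := PySem.List.pyRange_neg_one_eq_reverse ((n : Int) - 2) (-1)
      rw [show (-1 : Int) + 1 = 0 by ring, show ((n : Int) - 2) + 1 = (n : Int) - 1 by ring] at h
      exact h
    rcases Nat.lt_or_ge n 2 with h1' | h2'
    · have hn1 : n = 1 := by omega
      have e1 : PySem.List.pyRange 0 ((n : Int) - 1) 1 = [] := by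
        rw [hn1]; exact PySem.List.pyRange_one_eq_nil (a := 0) (b := (1 : Int) - 1) (by norm_num)
      rw [hst, h2, e1]
      simp [PySem.Chars.join_nil]
    · have hc : PySem.List.pyRange 0 ((n : Int) - 1) 1
          = 0 :: PySem.List.pyRange 1 ((n : Int) - 1) 1 := by
        have h := PySem.List.pyRange_one_cons (a := 0) (b := (n : Int) - 1) (by omega)
        simpa using h
      have hrev : (PySem.List.pyRange 0 ((n : Int) - 1) 1).reverse
          = (PySem.List.pyRange 1 ((n : Int) - 1) 1).reverse ++ [0] := by
        rw [hc]; simp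
      have hnot0 : (0 : Int) ∉ (PySem.List.pyRange 1 ((n : Int) - 1) 1).reverse := by
        simp [PySem.List.mem_pyRange_one]
      have hrevfold : (PySem.List.pyRange ((n : Int) - 2) (-1) (-1)).foldl
          (fun st i => st ++ f i ++ (if i ≠ 0 then ['\n'] else [])) []
          = PySem.Chars.join ['\n'] (((PySem.List.pyRange 0 ((n : Int) - 1) 1).reverse).map f) := by
        rw [h2, hrev, pv_foldl_sep_join ['\n'] f _ _ [] hnot0]
        simp
      rw [hst, hrevfold]

-- x[i:0:-1] for 0 <= i=k < len(x): the characters x[k], x[k-1], ..., x[1].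
theorem pv_temp2_eq (cs : List Char) (k : Nat) (hk : k < cs.length) :
    (PySem.List.slice? cs (some (k : Int)) (some 0) (-1)).getD []
      = (List.range k).map (fun t => cs.getD (k - t) '.') := by
  unfold PySem.List.slice? PySem.List.sliceIndices
  norm_num
  rw [if_neg (show ¬((k : Int) < 0) by omega)]
  have hstart : min (k : Int) ((cs.length : Int) - 1) = (k : Int) := by omega
  rw [hstart]
  rw [show min (0:Int) ((cs.length:Int)-1) = 0 from by omega]
  have hcount : (if (0 < (k : Int)) ∨ ((cs.length : Int) ≤ (k : Int)) then ((k : Int) - 0).toNat else 0) = k := by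
    split_ifs with h <;> omega
  rw [hcount]
  rw [List.filterMap_congr (g := fun t => some (cs.getD (k - t) '.')) ?_]
  simp [List.getD_eq_getElem?_getD]
  intro t ht
  rw [List.mem_range] at ht
  have hidx : ((k : Int) + -(t : Int)).toNat = k - t := by omega
  rw [hidx, List.getElem?_eq_getElem (by omega)]
  show some cs[k - t] = some (cs.getD (k - t) '.')
  rw [List.getD_eq_getElem _ _ (by omega)]

theorem pv_join_dot_eq : ∀ (l : List Char), l ≠ [] →
    PySem.Chars.join ['.'] (l.map (fun c => [c]))
      = (List.range (2 * l.length - 1)).map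
          (fun t => if t % 2 = 0 then l.getD (t / 2) '.' else '.') := by
  intro l
  induction l with
  | nil => intro h; exact absurd rfl h
  | cons a l ih =>
      intro _
      cases l with
      | nil => simp [PySem.Chars.join_singleton]
      | cons b l' =>
          have hne : b :: l' ≠ [] := by simp
          have ihx := ih hne
          simp only [List.map_cons] at ihx ⊢
          rw [PySem.Chars.join_cons_cons]
          rw [ihx]
          have hlen : 2 * (a :: b :: l').length - 1 = (2 * (b :: l').length - 1) + 1 + 1 := by
            simp [List.length_cons]; omega
          rw [hlen, List.range_succ_eq_map, List.range_succ_eq_map]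
          simp only [List.map_cons, List.map_map, Nat.succ_eq_add_one]
          norm_num
          intro t _
          have hmod : (t + 1 + 1) % 2 = t % 2 := by omega
          have hdiv : (t + 1 + 1) / 2 = t / 2 + 1 := by omega
          rw [hmod, hdiv]
          by_cases hp : t % 2 = 0
          · simp [hp]
          · simp [hp]

-- centering a row of length 4k+1 in width 4n-3: margin is even, so CPython's
-- (marg & width & 1) correction vanishes and the padding splits evenly.
theorem pv_center_eq (J : List Char) (n k : Nat) (hJ : J.length = 4 * k + 1)
    (hk : k ≤ n - 1) (hn : 1 ≤ n) :
    pvCenter J (4 * (n : Int) - 3)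
      = List.replicate (2 * (n - 1 - k)) '.' ++ J ++ List.replicate (2 * (n - 1 - k)) '.' := by
  unfold pvCenter
  by_cases hcase : 4 * (n : Int) - 3 ≤ (J.length : Int)
  · have hkn : k = n - 1 := by omega
    rw [if_pos hcase]
    have : 2 * (n - 1 - k) = 0 := by omega
    simp [this]
  · rw [if_neg hcase]
    simp only []
    have hmarg : (4 * (n : Int) - 3 - (J.length : Int)).toNat = 4 * (n - 1 - k) := by omega
    rw [hmarg]
    have hand : 4 * (n - 1 - k) &&& (4 * (n : Int) - 3).toNat &&& 1 = 0 := by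
      rw [Nat.and_assoc]
      rcases Nat.mod_two_eq_zero_or_one ((4 * (n : Int) - 3).toNat) with h | h
      · have h1 : (4 * (n : Int) - 3).toNat &&& 1 = 0 := by rw [Nat.and_one_is_mod, h]
        rw [h1, Nat.and_zero]
      · have h1 : (4 * (n : Int) - 3).toNat &&& 1 = 1 := by rw [Nat.and_one_is_mod, h]
        rw [h1, Nat.and_one_is_mod]
        omega
    rw [hand]
    have h2 : 4 * (n - 1 - k) / 2 + 0 = 2 * (n - 1 - k) := by omega
    rw [h2]
    have h3 : 4 * (n - 1 - k) - 2 * (n - 1 - k) = 2 * (n - 1 - k) := by omega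
    rw [h3]

theorem pv_row_eq (cs : List Char) (n : Nat) (i : Int) (hn : cs.length = n)
    (h0 : 0 ≤ i) (h1 : i ≤ (n : Int) - 1) :
    pvRowR cs n i = pvRow cs n i := by
  unfold pvRowR
  obtain ⟨k, hik⟩ : ∃ k : Nat, i = (k : Int) := ⟨i.toNat, by omega⟩
  subst hik
  have hkn : k ≤ n - 1 := by omega
  have hn1 : 1 ≤ n := by omega
  unfold pvRow
  simp only []
  -- temp1 = cs.take (k+1)
  rw [show ((k : Int) + 1) = ((k + 1 : Nat) : Int) by push_cast; ring]
  rw [PySem.List.slice_zero_start, PySem.List.slice_to_natCast]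
  -- temp2
  rw [pv_temp2_eq cs k (by omega)]
  set L : List Char := (List.range k).map (fun t => cs.getD (k - t) '.') ++ cs.take (k + 1) with hLdef
  have hLlen : L.length = 2 * k + 1 := by
    simp [hLdef]; omega
  have hLne : L ≠ [] := by
    intro h; rw [h] at hLlen; simp at hLlen
  rw [pv_join_dot_eq L hLne, hLlen]
  have h41 : 2 * (2 * k + 1) - 1 = 4 * k + 1 := by omega
  rw [h41]
  set J : List Char := (List.range (4 * k + 1)).map
      (fun t => if t % 2 = 0 then L.getD (t / 2) '.' else '.') with hJdef
  have hJlen : J.length = 4 * k + 1 := by simp [hJdef]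
  rw [pv_center_eq J n k hJlen hkn hn1]
  -- L.getD characterization
  have hLget : ∀ v : Nat, v ≤ 2 * k → L.getD v '.' = cs.getD (if v < k then k - v else v - k) '.' := by
    intro v hv
    by_cases hvk : v < k
    · rw [if_pos hvk, hLdef, List.getD_append _ _ _ _ (by simp; omega)]
      rw [List.getD_eq_getElem?_getD, List.getElem?_map, List.getElem?_range hvk]
      simp
    · rw [if_neg hvk, hLdef, List.getD_eq_getElem?_getD, List.getElem?_append_right (by simp; omega)]
      simp only [List.length_map, List.length_range]
      rw [List.getElem?_eq_getElem (by simp; omega)]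
      rw [List.getElem_take, Option.getD_some, List.getD_eq_getElem _ _ (by omega)]
  -- now elementwise
  set q : Nat := n - 1 - k with hq
  rw [PySem.List.pyRange_one]
  have hW : ((4 * (n : Int) - 3) - 0).toNat = 4 * n - 3 := by omega
  rw [hW]
  rw [List.map_map]
  apply List.ext_getElem
  · simp; omega
  intro c hc1 hc2
  have hcW : c < 4 * n - 3 := by simpa using hc1
  simp only [List.getElem_map, List.getElem_range, Function.comp_apply]
  unfold pvCell
  simp only []
  rcases Nat.lt_or_ge c (2 * q) with hcase1 | hrest
  · -- left padding
    have hd : |(0 + (c : Int)) - (2 * (n : Int) - 2)| = 2 * (n : Int) - 2 - (c : Int) := by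
      rw [abs_of_nonpos (by omega)]; ring
    rw [if_neg (by rw [hd]; rintro ⟨ha, -⟩; omega)]
    rw [List.getElem_append_left (by simp [hJlen]; omega), List.getElem_append_left (by simp; omega), List.getElem_replicate]
  · rcases Nat.lt_or_ge c (2 * q + (4 * k + 1)) with hcase2 | hcase3
    · -- middle
      set u : Nat := c - 2 * q with hu
      have hcu : c = 2 * q + u := by omega
      have hu4 : u ≤ 4 * k := by omega
      have hdval : (0 + (c : Int)) - (2 * (n : Int) - 2) = (u : Int) - 2 * (k : Int) := by omega
      rw [hdval]
      have hrhs : (List.replicate (2 * q) '.' ++ J ++ List.replicate (2 * q) '.')[c]'hc2 = J.getD u '.' := by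
        rw [List.getElem_append_left (by simp [hJlen]; omega)]
        rw [List.getElem_append_right (by simp; omega)]
        simp_rw [List.length_replicate]
        rw [List.getD_eq_getElem _ _ (by rw [hJlen]; omega)]
      rw [hrhs, hJdef, List.getD_eq_getElem?_getD, List.getElem?_map,
          List.getElem?_range (by omega)]
      simp only [Option.map_some, Option.getD_some]
      rcases Nat.mod_two_eq_zero_or_one u with hpar | hpar
      · -- even: a letter
        rw [if_pos hpar]
        have habs : |(u : Int) - 2 * (k : Int)| = ((if u / 2 < k then 2 * k - u else u - 2 * k : Nat) : Int) := by
          split_ifs with h <;> [rw [abs_of_nonpos (by omega)]; rw [abs_of_nonneg (by omega)]] <;> omega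
        have hmod : PySem.Int.mod ((u : Int) - 2 * (k : Int)) 2 = 0 := by
          rw [PySem.Int.mod_eq_emod_of_pos (by norm_num)]; omega
        rw [if_pos ⟨by rw [habs]; split_ifs <;> omega, hmod⟩]
        rw [habs]
        have hdivcast : PySem.Int.floordiv ((if u / 2 < k then 2 * k - u else u - 2 * k : Nat) : Int) 2
            = ((if u / 2 < k then k - u / 2 else u / 2 - k : Nat) : Int) := by
          rw [PySem.Int.floordiv_eq_ediv_of_pos (by norm_num)]
          split_ifs <;> omega
        rw [hdivcast, PySem.List.pyGet?_natCast]
        have hjlt : (if u / 2 < k then k - u / 2 else u / 2 - k) < n := by split_ifs <;> omega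
        rw [List.getElem?_eq_getElem (by omega), Option.getD_some]
        rw [hLget (u / 2) (by omega)]
        rw [List.getD_eq_getElem _ _ (by split_ifs <;> omega)]
      · -- odd: a dot
        rw [if_neg (by omega : ¬ u % 2 = 0)]
        rw [if_neg ?_]
        rintro ⟨-, hm⟩
        rw [PySem.Int.mod_eq_emod_of_pos (by norm_num)] at hm
        omega
    · -- right padding
      have hd : |(0 + (c : Int)) - (2 * (n : Int) - 2)| = (c : Int) - (2 * (n : Int) - 2) := by
        rw [abs_of_nonneg (by omega)]; ring
      rw [if_neg (by rw [hd]; rintro ⟨ha, -⟩; omega)]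
      rw [List.getElem_append_right (by simp [hJlen]; omega), List.getElem_replicate]

-- xs[-2::-1] = reverse of xs without its last element
theorem pv_slice_m2 {α : Type} (d : α) (xs : List α) :
    (PySem.List.slice? xs (some (-2)) none (-1)).getD [] = xs.dropLast.reverse := by
  unfold PySem.List.slice? PySem.List.sliceIndices
  norm_num
  rcases Nat.eq_zero_or_pos xs.length with h0 | hpos
  · have hx : xs = [] := List.eq_nil_of_length_eq_zero h0
    subst hx
    norm_num
  · rw [show max (-2 + (xs.length : Int)) (-1) = (xs.length : Int) - 2 by omega]
    by_cases hlen1 : xs.length = 1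
    · rw [if_neg (by omega)]
      have : xs.dropLast.reverse = [] := by
        have : xs.dropLast.length = 0 := by simp [hlen1]
        simpa using List.eq_nil_of_length_eq_zero this
      simp [this]
    · rw [if_pos (by omega)]
      rw [show ((xs.length : Int) - 2 + 1).toNat = xs.length - 1 by omega]
      rw [List.filterMap_congr
            (g := fun t => some (xs.getD (xs.length - 2 - t) (d)) ) ?_]
      · rw [show (fun t => some (xs.getD (xs.length - 2 - t) (d)))
              = some ∘ (fun t => xs.getD (xs.length - 2 - t) (d)) from rfl,
            List.filterMap_eq_map]
        apply List.ext_getElem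
        · simp
        intro t ht1 ht2
        simp only [List.getElem_map, List.getElem_range, List.getElem_reverse,
          List.getElem_dropLast, List.length_dropLast]
        rw [List.getD_eq_getElem _ _ (by simp at ht1; omega)]
        congr 1
      · intro t ht
        rw [List.mem_range] at ht
        rw [show ((xs.length : Int) - 2 + -(t : Int)).toNat = xs.length - 2 - t by omega]
        rw [List.getElem?_eq_getElem (by omega)]
        show some xs[xs.length - 2 - t] = some (xs.getD (xs.length - 2 - t) d)
        rw [List.getD_eq_getElem _ _ (by omega)]

-- length and entries of the closed-form row
theorem pv_rowR_length (cs : List Char) (n : Nat) (i : Int) :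
    (pvRowR cs n i).length = (4 * (n : Int) - 3).toNat := by
  unfold pvRowR
  rw [List.length_map, PySem.List.length_pyRange_one]
  omega

theorem pv_rowR_getElem (cs : List Char) (n : Nat) (i : Int) (c : Nat)
    (hc : c < (pvRowR cs n i).length) :
    (pvRowR cs n i)[c] = pvCell cs i (2 * (n : Int) - 2) (0 + (c : Int)) := by
  unfold pvRowR
  unfold pvRowR at hc
  rw [List.getElem_map, PySem.List.getElem_pyRange_one]

-- base row: all dots with x[0] at the centre column
theorem pv_base (cs : List Char) (n : Nat) (hpos : 1 ≤ n) :
    (List.replicate ((4 * (n : Int) - 3).toNat) '.').set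
        ((2 * (n : Int) - 2).toNat) ((PySem.List.pyGet? cs 0).getD '.')
      = pvRowR cs n 0 := by
  apply List.ext_getElem
  · rw [List.length_set, List.length_replicate, pv_rowR_length]
  intro c hc1 hc2
  rw [List.getElem_set, pv_rowR_getElem]
  unfold pvCell
  simp only []
  by_cases hcm : (2 * (n : Int) - 2).toNat = c
  · rw [if_pos hcm]
    have hd : 0 + (c : Int) - (2 * (n : Int) - 2) = 0 := by omega
    rw [hd]
    rw [if_pos ⟨by simp, by rw [PySem.Int.mod_eq_emod_of_pos (by norm_num)]; decide⟩]
    have h0 : PySem.Int.floordiv |(0 : Int)| 2 = 0 := by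
      rw [PySem.Int.floordiv_eq_ediv_of_pos (by norm_num)]; simp
    rw [h0]
  · rw [if_neg hcm, List.getElem_replicate]
    rw [if_neg ?_]
    rintro ⟨ha, -⟩
    have h1 := abs_nonneg ((0 : Int) + (c : Int) - (2 * (n : Int) - 2))
    have h0 : (0 : Int) + (c : Int) - (2 * (n : Int) - 2) = 0 :=
      abs_eq_zero.mp (le_antisymm (by simpa using ha) h1)
    exact hcm (by omega)

-- step: row i is row (i-1) with exactly the two cells p and w-1-p overwritten by x[i]
theorem pv_step (cs : List Char) (n : Nat) (i : Int)
    (h1 : 1 ≤ i) (h2 : i ≤ (n : Int) - 1) :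
    ((pvRowR cs n (i - 1)).set (2 * ((n : Int) - 1 - i)).toNat
        ((PySem.List.pyGet? cs i).getD '.')).set
      ((4 * (n : Int) - 3 - 1 - 2 * ((n : Int) - 1 - i)).toNat)
        ((PySem.List.pyGet? cs i).getD '.')
      = pvRowR cs n i := by
  have hdiv : PySem.Int.floordiv |(2 * i : Int)| 2 = i := by
    rw [abs_of_nonneg (by omega), PySem.Int.floordiv_eq_ediv_of_pos (by norm_num)]
    omega
  apply List.ext_getElem
  · rw [List.length_set, List.length_set, pv_rowR_length, pv_rowR_length]
  intro c hc1 hc2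
  have hcw : c < (4 * (n : Int) - 3).toNat := by
    have h := hc1
    rwa [List.length_set, List.length_set, pv_rowR_length] at h
  rw [List.getElem_set, List.getElem_set, pv_rowR_getElem, pv_rowR_getElem]
  by_cases hq : (4 * (n : Int) - 3 - 1 - 2 * ((n : Int) - 1 - i)).toNat = c
  · rw [if_pos hq]
    unfold pvCell
    simp only []
    have hd : 0 + (c : Int) - (2 * (n : Int) - 2) = 2 * i := by omega
    rw [hd]
    rw [if_pos ⟨by rw [abs_of_nonneg (by omega)], by
      rw [PySem.Int.mod_eq_emod_of_pos (by norm_num)]; omega⟩]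
    rw [hdiv]
  · rw [if_neg hq]
    by_cases hp : (2 * ((n : Int) - 1 - i)).toNat = c
    · rw [if_pos hp]
      unfold pvCell
      simp only []
      have hd : 0 + (c : Int) - (2 * (n : Int) - 2) = -(2 * i) := by omega
      rw [hd]
      rw [if_pos ⟨by rw [abs_neg, abs_of_nonneg (by omega)], by
        rw [PySem.Int.mod_eq_emod_of_pos (by norm_num)]; omega⟩]
      rw [abs_neg, hdiv]
    · -- untouched cell: the two rules agree
      unfold pvCell
      simp only []
      rcases abs_cases ((0 : Int) + (c : Int) - (2 * (n : Int) - 2)) with ⟨he, hs⟩ | ⟨he, hs⟩ <;>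
        rw [he] <;>
        rw [PySem.Int.mod_eq_emod_of_pos (show (0:Int) < 2 by norm_num)] <;>
        split_ifs with hA hB hB <;> first
          | rfl
          | (exfalso; omega)

-- loop invariant: after the rows a..n-1 are processed the accumulated list holds all rows
theorem pv_fold_inv (cs : List Char) (n : Nat) :
    ∀ (t : Nat) (a : Int), 1 ≤ a → a + (t : Int) = (n : Int) → ∀ (rs : List (List Char)),
      (PySem.List.pyRange a (n : Int) 1).foldl (pvStepB cs n) (rs, pvRowR cs n (a - 1))
        = (rs ++ (PySem.List.pyRange a (n : Int) 1).map (pvRowR cs n),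
           pvRowR cs n ((n : Int) - 1)) := by
  intro t
  induction t with
  | zero =>
      intro a ha1 ha2 rs
      have he : PySem.List.pyRange a (n : Int) 1 = [] :=
        PySem.List.pyRange_one_eq_nil (by omega)
      rw [he]
      simp only [List.foldl_nil, List.map_nil, List.append_nil]
      rw [show a - 1 = (n : Int) - 1 by omega]
  | succ t ih =>
      intro a ha1 ha2 rs
      have hc : PySem.List.pyRange a (n : Int) 1 = a :: PySem.List.pyRange (a + 1) (n : Int) 1 :=
        PySem.List.pyRange_one_cons (by omega)
      rw [hc]
      simp only [List.foldl_cons, List.map_cons]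
      have hstep : pvStepB cs n (rs, pvRowR cs n (a - 1)) a
          = (rs ++ [pvRowR cs n a], pvRowR cs n a) := by
        unfold pvStepB
        simp only []
        rw [pv_step cs n a ha1 (by omega)]
      rw [hstep]
      have := ih (a + 1) (by omega) (by omega) (rs ++ [pvRowR cs n a])
      rw [show a + 1 - 1 = a from by ring] at this
      rw [this]
      simp

-- ===== VERDICT (by name: the statement is the Claim_ definition above) =====
theorem ascii_art_spec : Claim_equal_ascii_art := by
  intro x _
  unfold Spec_ascii_art
  rw [pv_A_form]
  unfold ascii_art_alt
  simp only []
  set cs := x.toList with hcs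
  set n := cs.length with hn
  rcases Nat.eq_zero_or_pos n with h0 | hpos
  · rw [if_neg (by omega)]
    have e2 : PySem.List.pyRange 0 (n : Int) 1 = [] :=
      PySem.List.pyRange_one_eq_nil (a := 0) (b := (n : Int)) (by omega)
    have e3 : PySem.List.pyRange 0 ((n : Int) - 1) 1 = [] :=
      PySem.List.pyRange_one_eq_nil (a := 0) (b := (n : Int) - 1) (by omega)
    rw [pv_slice_m2 ([] : List Char)]
    simp [e2, e3, PySem.Chars.join_nil]
  · rw [if_pos (by omega)]
    rw [pv_base cs n (by omega)]
    have hfold := pv_fold_inv cs n (n - 1) 1 (by omega) (by omega) [pvRowR cs n 0]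
    rw [show (1 : Int) - 1 = 0 from by ring] at hfold
    rw [hfold]
    simp only []
    have hrows : pvRowR cs n 0 :: (PySem.List.pyRange 1 (n : Int) 1).map (pvRowR cs n)
        = (PySem.List.pyRange 0 (n : Int) 1).map (pvRowR cs n) := by
      have hc0 := PySem.List.pyRange_one_cons (a := (0 : Int)) (b := (n : Int)) (by omega)
      rw [show (0 : Int) + 1 = 1 from by ring] at hc0
      rw [hc0, List.map_cons]
    rw [show [pvRowR cs n 0] ++ (PySem.List.pyRange 1 (n : Int) 1).map (pvRowR cs n)
        = pvRowR cs n 0 :: (PySem.List.pyRange 1 (n : Int) 1).map (pvRowR cs n) from rfl, hrows]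
    have hmapR : (PySem.List.pyRange 0 (n : Int) 1).map (pvRowR cs n)
        = (PySem.List.pyRange 0 (n : Int) 1).map (pvRow cs n) := by
      apply List.map_congr_left
      intro r hr
      rw [PySem.List.mem_pyRange_one] at hr
      exact pv_row_eq cs n r rfl hr.1 (by omega)
    rw [hmapR, pv_slice_m2 ([] : List Char)]
    -- dropLast of the rows is the rows over 0..n-2
    have hsplit : PySem.List.pyRange 0 (n : Int) 1
        = PySem.List.pyRange 0 ((n : Int) - 1) 1 ++ [(n : Int) - 1] := by
      have h := PySem.List.pyRange_one_succ_right (a := 0) (b := (n : Int) - 1) (by omega)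
      rw [show ((n : Int) - 1) + 1 = (n : Int) by ring] at h
      exact h
    have hdrop : ((PySem.List.pyRange 0 (n : Int) 1).map (pvRow cs n)).dropLast
        = (PySem.List.pyRange 0 ((n : Int) - 1) 1).map (pvRow cs n) := by
      rw [hsplit]; simp
    rw [hdrop, ← List.map_reverse]
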